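-- pv_equiv track=rewrite | github.com/seanstappas/dynamic-connect-4 | heuristics.py | distance_between_pieces
-- ===== SOURCE A (Python) =====
-- ADJACENT_DIRECTIONS = ((0, 1), (1, -1), (1, 0), (1, 1))  # Only need to consider half, since all x,y tuples explored
--
-- def distance_between_pieces(state):
--     """
--     Heuristic which computes how many pieces of the same colour are adjacent to others of the same colour.
--
--     :param state: the state to compute the heuristic of
--     :return: the heuristic value of the given state, where bigger values are better for the maximizing player
--     """
--     white_squares = state[0]
--     black_squares = state[1]
--
--     def dist_between(squares):
--         count = 0
--         for x, y in squares:
--             for i, j in ADJACENT_DIRECTIONS: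
--                 if (x + i, y + j) in squares:
--                     count += 1
--         return count
--
--     return dist_between(white_squares) - dist_between(black_squares)
-- ===== SOURCE B (Python) =====
-- def distance_between_pieces(state):
--     """Pairwise scan: count unordered same-colour pairs at Chebyshev distance 1
--     (8-neighbour adjacency), white minus black."""
--     def adj_pairs(squares):
--         c = 0
--         rest = list(squares)
--         while rest:
--             x, y = rest.pop(0)
--             for u, v in rest:
--                 if max(abs(x - u), abs(y - v)) == 1:
--                     c += 1
--         return c
--     return adj_pairs(state[0]) - adj_pairs(state[1])
-- ===== Notes on version B (the rewrite author's own statement) =====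
-- stated objective: alternative
-- what changed: Replaces A's per-piece half-direction membership lookups by a pairwise scan over unordered piece pairs counting those at Chebyshev distance 1; Pre_ requires duplicate-free piece lists (the game's states are Python sets, so this excludes nothing in practice), since on duplicated list entries A counts per occurrence via membership while B counts occurrence pairs.
import Mathlib
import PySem

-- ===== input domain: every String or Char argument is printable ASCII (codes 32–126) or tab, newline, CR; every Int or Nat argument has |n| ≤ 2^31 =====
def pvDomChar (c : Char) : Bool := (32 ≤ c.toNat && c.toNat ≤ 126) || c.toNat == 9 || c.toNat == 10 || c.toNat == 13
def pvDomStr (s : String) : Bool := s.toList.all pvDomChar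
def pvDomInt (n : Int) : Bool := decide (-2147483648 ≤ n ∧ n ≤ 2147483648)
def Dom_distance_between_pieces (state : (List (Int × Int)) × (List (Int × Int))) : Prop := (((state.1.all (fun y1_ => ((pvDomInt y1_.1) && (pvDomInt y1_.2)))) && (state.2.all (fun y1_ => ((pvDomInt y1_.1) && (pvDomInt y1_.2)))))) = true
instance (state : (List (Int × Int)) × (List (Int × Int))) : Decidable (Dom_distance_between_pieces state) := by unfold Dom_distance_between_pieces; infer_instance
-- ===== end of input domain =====

-- B replaces A's per-piece half-direction membership lookups by a pairwise scan
-- over unordered pairs of pieces at Chebyshev distance 1 (alternative algorithm,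
-- same asymptotic cost).

-- ===== PORT A =====
-- ADJACENT_DIRECTIONS
def pvAdjDirs : List (Int × Int) := [(0, 1), (1, -1), (1, 0), (1, 1)]

-- dist_between: the two nested for-loops become nested foldl over the same state
def pvDistBetween (squares : List (Int × Int)) : Int :=
  squares.foldl (fun count p =>
    pvAdjDirs.foldl (fun c d =>
      if (p.1 + d.1, p.2 + d.2) ∈ squares then c + 1 else c) count) 0

def distance_between_pieces (state : (List (Int × Int)) × (List (Int × Int))) : Int :=
  pvDistBetween state.1 - pvDistBetween state.2

-- ===== PORT B =====
-- adj_pairs: 'while rest: (x,y) = rest.pop(0); for (u,v) in rest: …' becomes the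
-- head/tail recursion over the list, threading the counter c
def pvAdjPairsB : List (Int × Int) → Int → Int
  | [], c => c
  | p :: rest, c =>
      pvAdjPairsB rest
        (rest.foldl (fun c q =>
          if max (p.1 - q.1).natAbs (p.2 - q.2).natAbs = 1 then c + 1 else c) c)

def distance_between_pieces_alt (state : (List (Int × Int)) × (List (Int × Int))) : Int :=
  pvAdjPairsB state.1 0 - pvAdjPairsB state.2 0

-- ===== PRECONDITION & SPEC =====
-- Pre_ excludes lists with duplicate positions — never produced by the game's
-- set-valued states — on which A counts per occurrence via membership while B
-- counts occurrence pairs.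
def Pre_distance_between_pieces (state : (List (Int × Int)) × (List (Int × Int))) : Prop :=
  state.1.Nodup ∧ state.2.Nodup
instance (state : (List (Int × Int)) × (List (Int × Int))) : Decidable (Pre_distance_between_pieces state) := by unfold Pre_distance_between_pieces; infer_instance

def pvWitness_distance_between_pieces : ((List (Int × Int)) × (List (Int × Int))) :=
  ([(0, 0), (0, 1), (2, 2)], [(5, 5), (6, 5)])

def Spec_distance_between_pieces (state : (List (Int × Int)) × (List (Int × Int))) (out : Int) : Prop := out = distance_between_pieces_alt state
instance (state : (List (Int × Int)) × (List (Int × Int))) (out : Int) : Decidable (Spec_distance_between_pieces state out) := by unfold Spec_distance_between_pieces; infer_instance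

-- ===== CLAIM (what is proved, stated in full; the proofs are below) =====
def Claim_equal_distance_between_pieces : Prop := ∀ (state : (List (Int × Int)) × (List (Int × Int))), Dom_distance_between_pieces state → Pre_distance_between_pieces state → Spec_distance_between_pieces state (distance_between_pieces state)

-- ===== LEMMAS AND PROOFS =====

-- ordered-adjacency relation of A: q is p shifted by one of the four half-directions
def pvR (p q : Int × Int) : Bool := decide ((q.1 - p.1, q.2 - p.2) ∈ pvAdjDirs)
-- unordered-adjacency test of B: Chebyshev distance 1
def pvC (p q : Int × Int) : Bool := decide (max (p.1 - q.1).natAbs (p.2 - q.2).natAbs = 1)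

-- A's count as a Nat double sum
def pvN (l : List (Int × Int)) : Nat :=
  (l.map (fun p => pvAdjDirs.countP (fun d => decide ((p.1 + d.1, p.2 + d.2) ∈ l)))).sum

-- ordered-pair double sum
def pvH (l : List (Int × Int)) : Nat :=
  (l.map (fun p => l.countP (pvR p))).sum

-- B's count: unordered pairs (i < j) at Chebyshev distance 1
def pvP : List (Int × Int) → Nat
  | [] => 0
  | a :: t => t.countP (pvC a) + pvP t

theorem pv_foldl_if_count {α : Type} (P : α → Prop) [DecidablePred P] :
    ∀ (l : List α) (c : Int),
      l.foldl (fun c a => if P a then c + 1 else c) c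
        = c + l.countP (fun a => decide (P a)) := by
  intro l
  induction l with
  | nil => intro c; simp
  | cons a t ih =>
    intro c
    simp only [List.foldl_cons, List.countP_cons, ih]
    by_cases h : P a
    · simp [h]; ring
    · simp [h]

theorem pv_foldl_add_map {α : Type} (f : α → Int) :
    ∀ (l : List α) (c : Int),
      l.foldl (fun c a => c + f a) c = c + (l.map f).sum := by
  intro l
  induction l with
  | nil => intro c; simp
  | cons a t ih => intro c; simp [ih]; ring

theorem pv_cast_sum {α : Type} (g : α → Nat) :
    ∀ (l : List α), (((l.map g).sum : Nat) : Int) = (l.map (fun a => ((g a : Nat) : Int))).sum := by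
  intro l
  induction l with
  | nil => simp
  | cons a t ih => simp [ih]

-- A's port computes pvN
theorem pv_portA_eq (s : List (Int × Int)) : pvDistBetween s = (pvN s : Int) := by
  unfold pvDistBetween pvN
  have hstep : (fun (count : Int) (p : Int × Int) =>
      pvAdjDirs.foldl (fun c d =>
        if (p.1 + d.1, p.2 + d.2) ∈ s then c + 1 else c) count)
      = fun (count : Int) (p : Int × Int) =>
          count + pvAdjDirs.countP (fun d => decide ((p.1 + d.1, p.2 + d.2) ∈ s)) := by
    funext count p
    exact pv_foldl_if_count (fun d => (p.1 + d.1, p.2 + d.2) ∈ s) pvAdjDirs count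
  rw [hstep, pv_foldl_add_map, pv_cast_sum]
  simp

-- B's port computes pvP
theorem pv_portB_eq : ∀ (l : List (Int × Int)) (c : Int), pvAdjPairsB l c = c + (pvP l : Int) := by
  intro l
  induction l with
  | nil => intro c; simp [pvAdjPairsB, pvP]
  | cons a t ih =>
    intro c
    show pvAdjPairsB t _ = _
    rw [ih, pv_foldl_if_count (fun q => max (a.1 - q.1).natAbs (a.2 - q.2).natAbs = 1) t c]
    show c + (t.countP (pvC a) : Int) + (pvP t : Int) = c + ((t.countP (pvC a) + pvP t : Nat) : Int)
    push_cast
    ring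

-- disjoint countP splits
theorem pv_countP_or {α : Type} (P Q : α → Bool) (h : ∀ a, ¬(P a = true ∧ Q a = true)) :
    ∀ (l : List α), l.countP (fun a => P a || Q a) = l.countP P + l.countP Q := by
  intro l
  induction l with
  | nil => simp
  | cons a t ih =>
    simp only [List.countP_cons, ih]
    by_cases hp : P a = true
    · have hq : Q a = false := by
        cases hQ : Q a
        · rfl
        · exact absurd ⟨hp, hQ⟩ (h a)
      simp [hp, hq]; omega
    · simp [Bool.eq_false_iff.mpr hp]; omega

-- counting one value in a duplicate-free list
theorem pv_countP_eq_nodup {α : Type} [DecidableEq α] (x : α) :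
    ∀ (l : List α), l.Nodup →
      l.countP (fun q => decide (q = x)) = if x ∈ l then 1 else 0 := by
  intro l
  induction l with
  | nil => simp
  | cons a t ih =>
    intro h
    rcases List.nodup_cons.mp h with ⟨ha, ht⟩
    simp only [List.countP_cons, ih ht, List.mem_cons]
    by_cases hx : a = x
    · subst hx
      simp [ha]
    · simp [hx, Ne.symm hx]

theorem pv_sum_map_add {α : Type} (f g : α → Nat) :
    ∀ (l : List α), (l.map (fun x => f x + g x)).sum = (l.map f).sum + (l.map g).sum := by
  intro l
  induction l with
  | nil => simp
  | cons a t ih => simp only [List.map_cons, List.sum_cons, ih]; omega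

theorem pv_sum_ite {α : Type} (f : α → Bool) :
    ∀ (t : List α),
      (t.map (fun q => if f q then (1 : Nat) else 0)).sum = t.countP f := by
  intro t
  induction t with
  | nil => simp
  | cons q t ih =>
    simp only [List.map_cons, List.sum_cons, List.countP_cons, ih]
    split_ifs <;> omega

-- per-piece conversion: A's 4 directional membership tests count exactly the
-- pieces of l that are half-direction shifts of p (needs l duplicate-free)
theorem pv_inner_eq (p : Int × Int) (l : List (Int × Int)) (h : l.Nodup) :
    pvAdjDirs.countP (fun d => decide ((p.1 + d.1, p.2 + d.2) ∈ l)) = l.countP (pvR p) := by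
  have hpred : pvR p = fun q =>
      ((decide (q = (p.1, p.2 + 1)) || decide (q = (p.1 + 1, p.2 - 1))) ||
        (decide (q = (p.1 + 1, p.2)) || decide (q = (p.1 + 1, p.2 + 1)))) := by
    funext q
    have hd : ∀ (x y : Prop) [Decidable x] [Decidable y], decide (x ∨ y) = (decide x || decide y) := by
      intro x y _ _
      by_cases hx : x <;> by_cases hy : y <;> simp [hx, hy]
    simp only [pvR, ← hd]
    rw [decide_eq_decide]
    simp only [pvAdjDirs, List.mem_cons, List.not_mem_nil, or_false, Prod.ext_iff]
    constructor
    · rintro (⟨h1, h2⟩ | ⟨h1, h2⟩ | ⟨h1, h2⟩ | ⟨h1, h2⟩) <;> omega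
    · rintro ((⟨h1, h2⟩ | ⟨h1, h2⟩) | (⟨h1, h2⟩ | ⟨h1, h2⟩)); omega; omega; omega; omega
  rw [hpred]
  rw [pv_countP_or _ _ ?disj1 l, pv_countP_or _ _ ?disj2 l, pv_countP_or _ _ ?disj3 l]
  case disj1 =>
    rintro q ⟨h1, h2⟩
    rw [Bool.or_eq_true, decide_eq_true_eq, decide_eq_true_eq] at h1 h2
    rcases h1 with h1 | h1 <;> rcases h2 with h2 | h2 <;>
      (subst h1; rw [Prod.ext_iff] at h2; simp only at h2; omega)
  case disj2 =>
    rintro q ⟨h1, h2⟩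
    rw [decide_eq_true_eq] at h1 h2
    subst h1; rw [Prod.ext_iff] at h2; simp only at h2; omega
  case disj3 =>
    rintro q ⟨h1, h2⟩
    rw [decide_eq_true_eq] at h1 h2
    subst h1; rw [Prod.ext_iff] at h2; simp only at h2; omega
  rw [pv_countP_eq_nodup _ l h, pv_countP_eq_nodup _ l h,
    pv_countP_eq_nodup _ l h, pv_countP_eq_nodup _ l h]
  simp only [pvAdjDirs, List.countP_cons, List.countP_nil, decide_eq_true_eq]
  have e1 : (p.1 + 0, p.2 + 1) = (p.1, p.2 + 1) := by rw [Prod.ext_iff]; simp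
  have e2 : (p.1 + 1, p.2 + -1) = (p.1 + 1, p.2 - 1) := by rw [Prod.ext_iff]; constructor <;> simp <;> omega
  have e3 : (p.1 + 1, p.2 + 0) = (p.1 + 1, p.2) := by rw [Prod.ext_iff]; simp
  rw [e1, e2, e3]
  split_ifs <;> omega

-- exactly one of pvR p q, pvR q p holds iff p and q are Chebyshev-adjacent
theorem pv_RC (p q : Int × Int) :
    (if pvR p q then (1 : Nat) else 0) + (if pvR q p then 1 else 0)
      = if pvC p q then 1 else 0 := by
  simp only [pvR, pvC, pvAdjDirs, List.mem_cons, List.not_mem_nil, or_false,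
    Prod.ext_iff, decide_eq_true_eq]
  split_ifs <;> omega

theorem pv_countP_pair (a : Int × Int) :
    ∀ (t : List (Int × Int)),
      t.countP (pvR a) + t.countP (fun p => pvR p a) = t.countP (pvC a) := by
  intro t
  induction t with
  | nil => simp
  | cons q t ih =>
    simp only [List.countP_cons]
    have := pv_RC a q
    split_ifs at * <;> omega

theorem pv_R_self (a : Int × Int) : pvR a a = false := by
  simp [pvR, pvAdjDirs]

theorem pvH_eq_pvP : ∀ (l : List (Int × Int)), pvH l = pvP l := by
  intro l
  induction l with
  | nil => rfl
  | cons a t ih =>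
    have hmap : t.map (fun p => (a :: t).countP (pvR p))
        = t.map (fun p => (if pvR p a then (1 : Nat) else 0) + t.countP (pvR p)) := by
      refine List.map_congr_left (fun p _ => ?_)
      rw [List.countP_cons]
      split_ifs <;> omega
    show ((a :: t).map (fun p => (a :: t).countP (pvR p))).sum = pvP (a :: t)
    rw [List.map_cons, List.sum_cons, hmap]
    rw [pv_sum_map_add, pv_sum_ite (fun p => pvR p a) t]
    have hhead : (a :: t).countP (pvR a) = t.countP (pvR a) := by
      simp [pv_R_self a]
    rw [hhead]
    show t.countP (pvR a) + (t.countP (fun p => pvR p a) + pvH t) = t.countP (pvC a) + pvP t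
    rw [ih, ← pv_countP_pair a t]
    omega

theorem pvN_eq_pvP (l : List (Int × Int)) (h : l.Nodup) : pvN l = pvP l := by
  rw [← pvH_eq_pvP]
  unfold pvN pvH
  congr 1
  exact List.map_congr_left (fun p _ => pv_inner_eq p l h)

-- ===== VERDICT (by name: the statement is the Claim_ definition above) =====
theorem distance_between_pieces_spec : Claim_equal_distance_between_pieces := by
  intro state _ pre
  unfold Spec_distance_between_pieces distance_between_pieces distance_between_pieces_alt
  rw [pv_portA_eq, pv_portA_eq, pv_portB_eq, pv_portB_eq,
    pvN_eq_pvP state.1 pre.1, pvN_eq_pvP state.2 pre.2]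
  simp
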